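-- pv_equiv track=rewrite | github.com/jewettaij/moltemplate | moltemplate/ttree_lex.py | TextBlock2Lines
-- ===== SOURCE A (Python) =====
-- def TextBlock2Lines(text, delimiters, keep_delim=True):
--     """ This splits a string into a list of sub-strings split by delimiter
--     characters.  This function is different from the standard str.split()
--     function: The string is split at every character which belongs to the
--     "delimiters" argument (which can be a string or some other container).
--     This character is included at the end of every substring.  Example:
--     TextBlock2Lines('\nabc\nde^fg\nhi j\n', '^\n')
--     returns:
--     ['\n', 'abc\n', 'de^', 'fg\n', 'hi j\n']
--
--     """
--     ls = []
--     i = 0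
--     i_prev = 0
--     while i < len(text):
--         if text[i] in delimiters:
--             if keep_delim:
--                 ls.append(text[i_prev:i + 1])
--             else:
--                 ls.append(text[i_prev:i])
--             i_prev = i + 1
--         i += 1
--     if (i_prev < len(text)):
--         ls.append(text[i_prev:i + 1])
--     return ls
-- ===== SOURCE B (Python) =====
-- def TextBlock2Lines(text, delimiters, keep_delim=True):
--     dset = set(delimiters)
--     ls = []
--     buf = []
--     for c in text:
--         if c in dset:
--             if keep_delim:
--                 buf.append(c)
--             ls.append(''.join(buf))
--             buf = []
--         else:
--             buf.append(c)
--     if buf: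
--         ls.append(''.join(buf))
--     return ls
-- ===== Notes on version B (the rewrite author's own statement) =====
-- stated objective: faster
-- what changed: B drops A's index arithmetic and slicing entirely: one pass over the characters maintaining a growing segment buffer flushed at each delimiter, with delimiter membership tested against a set built once instead of A's per-character scan of the delimiter string.
import Mathlib
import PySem

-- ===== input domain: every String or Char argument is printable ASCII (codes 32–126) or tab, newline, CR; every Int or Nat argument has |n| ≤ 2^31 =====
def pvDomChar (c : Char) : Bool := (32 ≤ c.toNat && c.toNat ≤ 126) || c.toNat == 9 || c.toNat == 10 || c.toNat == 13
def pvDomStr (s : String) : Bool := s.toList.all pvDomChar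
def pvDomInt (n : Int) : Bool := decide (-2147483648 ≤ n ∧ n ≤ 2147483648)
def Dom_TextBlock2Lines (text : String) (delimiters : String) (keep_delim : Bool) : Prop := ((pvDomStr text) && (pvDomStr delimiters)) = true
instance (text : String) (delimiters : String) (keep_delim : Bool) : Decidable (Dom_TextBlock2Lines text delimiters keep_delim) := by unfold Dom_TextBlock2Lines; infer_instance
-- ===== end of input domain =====

-- B builds each segment in a character buffer during one pass (no indices, no slicing),
-- where A tracks two integer indices and slices the text; objective: alternative decomposition.

-- ===== PORT A =====
-- text[a:b] for natural a ≤ b, clamped past the end exactly as Python slices are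
def pvSlice (full : List Char) (a b : Nat) : List Char := (full.drop a).take (b - a)

-- A's while-loop: `rest` is the unprocessed suffix, `i` the index, `iprev` = i_prev;
-- the trailing `if i_prev < len(text)` of A is the base case (there i = len(text)).
def pvLoopA (ds : List Char) (keep : Bool) (full : List Char) :
    List Char → Nat → Nat → List (List Char)
  | [], _i, iprev =>
      if iprev < full.length then [pvSlice full iprev (_i + 1)] else []
  | c :: rest, i, iprev =>
      if c ∈ ds then
        (if keep then pvSlice full iprev (i + 1) else pvSlice full iprev i) ::
          pvLoopA ds keep full rest (i + 1) (i + 1)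
      else
        pvLoopA ds keep full rest (i + 1) iprev

def TextBlock2Lines (text : String) (delimiters : String) (keep_delim : Bool) : List String :=
  (pvLoopA delimiters.toList keep_delim text.toList text.toList 0 0).map String.ofList

-- ===== PORT B =====
-- Source B's for-loop over the characters, carrying (ls, buf); ls is produced head-first by the
-- recursion, buf is the current segment's characters; base case = the trailing `if buf:` append.
def pvLoopB (ds : PySem.Set Char) (keep : Bool) : List Char → List Char → List (List Char)
  | [], buf => if buf.isEmpty then [] else [buf]
  | c :: rest, buf =>
      if c ∈ ds then
        (if keep then buf ++ [c] else buf) :: pvLoopB ds keep rest []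
      else
        pvLoopB ds keep rest (buf ++ [c])

def TextBlock2Lines_alt (text : String) (delimiters : String) (keep_delim : Bool) : List String :=
  (pvLoopB (PySem.Set.ofList delimiters.toList) keep_delim text.toList []).map String.ofList

-- ===== PRECONDITION & SPEC =====
def Spec_TextBlock2Lines (text : String) (delimiters : String) (keep_delim : Bool) (out : List String) : Prop := out = TextBlock2Lines_alt text delimiters keep_delim
instance (text : String) (delimiters : String) (keep_delim : Bool) (out : List String) : Decidable (Spec_TextBlock2Lines text delimiters keep_delim out) := by unfold Spec_TextBlock2Lines; infer_instance

-- ===== CLAIM =====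
def Claim_equal_TextBlock2Lines : Prop := ∀ (text : String) (delimiters : String) (keep_delim : Bool), Dom_TextBlock2Lines text delimiters keep_delim → Spec_TextBlock2Lines text delimiters keep_delim (TextBlock2Lines text delimiters keep_delim)

-- ===== LEMMAS AND PROOFS =====
theorem pvSlice_snoc (full : List Char) (i iprev : Nat) (c : Char) (rest : List Char)
    (hle : iprev ≤ i) (hd : full.drop i = c :: rest) :
    pvSlice full iprev (i + 1) = pvSlice full iprev i ++ [c] := by
  unfold pvSlice
  have h1 : (full.drop iprev).drop (i - iprev) = c :: rest := by
    rw [List.drop_drop]; rw [show iprev + (i - iprev) = i by omega]; exact hd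
  have h2 : i + 1 - iprev = (i - iprev) + 1 := by omega
  rw [h2, List.take_add, h1]
  simp

theorem pvLoopA_eq_pvLoopB (ds : List Char) (keep : Bool) (full : List Char) :
    ∀ (rest : List Char) (i iprev : Nat), full.drop i = rest → iprev ≤ i →
      pvLoopA ds keep full rest i iprev =
        pvLoopB (PySem.Set.ofList ds) keep rest (pvSlice full iprev i) := by
  intro rest
  induction rest with
  | nil =>
      intro i iprev hd hle
      have hlen : full.length ≤ i := by
        by_contra h
        have := List.drop_eq_nil_iff.mp hd
        omega
      simp only [pvLoopA, pvLoopB]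
      have hbuf : pvSlice full iprev i = full.drop iprev := by
        unfold pvSlice
        exact List.take_of_length_le (by simp; omega)
      rw [hbuf]
      by_cases hlt : iprev < full.length
      · rw [if_pos hlt, if_neg (by simp [List.isEmpty_iff, List.drop_eq_nil_iff]; omega)]
        unfold pvSlice
        rw [List.take_of_length_le (by simp; omega)]
      · rw [if_neg hlt, if_pos (by simp [List.isEmpty_iff, List.drop_eq_nil_iff]; omega)]
  | cons c rest ih =>
      intro i iprev hd hle
      have hd' : full.drop (i + 1) = rest := by
        have : (full.drop i).drop 1 = rest := by rw [hd]; simp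
        rw [List.drop_drop] at this
        exact this
      have hmem : (c ∈ PySem.Set.ofList ds) ↔ (c ∈ ds) := PySem.Set.mem_ofList ds c
      by_cases hc : c ∈ ds
      · simp only [pvLoopA, pvLoopB, if_pos hc, if_pos (hmem.mpr hc)]
        rw [ih (i + 1) (i + 1) hd' le_rfl]
        have hnil : pvSlice full (i + 1) (i + 1) = [] := by
          unfold pvSlice; simp
        rw [hnil, pvSlice_snoc full i iprev c rest hle hd]
      · simp only [pvLoopA, pvLoopB, if_neg hc, if_neg (fun h => hc (hmem.mp h))]
        rw [ih (i + 1) iprev hd' (by omega),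
          pvSlice_snoc full i iprev c rest hle hd]

-- ===== VERDICT =====
theorem TextBlock2Lines_spec : Claim_equal_TextBlock2Lines := by
  intro text delimiters keep_delim _
  unfold Spec_TextBlock2Lines TextBlock2Lines TextBlock2Lines_alt
  rw [pvLoopA_eq_pvLoopB _ _ _ _ 0 0 (by simp) le_rfl]
  rfl
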